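-- pv_equiv track=rewrite | github.com/Zeeshanansarii/ai-auto-extraction-code-for-json-schema | text_to_json.py | group_fields
-- ===== SOURCE A (Python) =====
-- from typing import Dict, Tuple, List, Any, Generator
--
-- def group_fields(fields: List[Dict]) -> List[List[Dict]]:
--     groups = {}
--     for field in fields:
--         parent = '.'.join(field["path"].split('.')[:-1]) or "root"
--         if parent not in groups:
--             groups[parent] = []
--         groups[parent].append(field)
--     return list(groups.values())
-- ===== SOURCE B (Python) =====
-- from typing import Dict, List
--
--
-- def _parent(field: Dict) -> str:
--     return '.'.join(field["path"].split('.')[:-1]) or "root"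
--
--
-- def group_fields(fields: List[Dict]) -> List[List[Dict]]:
--     # Pass 1: ordered list of distinct parent keys, in first-appearance order.
--     parents = []
--     for field in fields:
--         p = _parent(field)
--         if p not in parents:
--             parents.append(p)
--     # Pass 2: one filtering scan per parent; original order within each group.
--     return [[f for f in fields if _parent(f) == p] for p in parents]
-- ===== Notes on version B (the rewrite author's own statement) =====
-- stated objective: alternative
-- what changed: Replaces the single dict-accumulation pass (insert-empty-then-append per field, return dict values) by a two-phase scheme: one pass collecting the distinct parent keys in first-appearance order, then one filtering scan of the input per parent to build its group; Pre_ only excludes fields without a 'path' key, on which both programs raise KeyError.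
import Mathlib
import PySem

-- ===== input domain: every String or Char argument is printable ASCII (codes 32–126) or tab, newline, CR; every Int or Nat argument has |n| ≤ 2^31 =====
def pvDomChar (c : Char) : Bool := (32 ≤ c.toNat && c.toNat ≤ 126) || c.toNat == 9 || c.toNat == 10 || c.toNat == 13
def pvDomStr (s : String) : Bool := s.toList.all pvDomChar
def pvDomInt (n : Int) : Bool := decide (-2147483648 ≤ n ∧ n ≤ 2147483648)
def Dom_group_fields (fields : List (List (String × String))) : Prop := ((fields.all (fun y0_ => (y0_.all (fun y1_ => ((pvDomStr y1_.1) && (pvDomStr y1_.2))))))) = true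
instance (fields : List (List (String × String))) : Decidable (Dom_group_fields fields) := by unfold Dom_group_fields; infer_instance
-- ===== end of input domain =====

-- B groups by a distinct-parents pass plus one filtering scan per parent instead of A's
-- dict-accumulation pass; equal output (group order = first appearance, inner order = input order).

-- shared helper: '.'.join(field["path"].split('.')[:-1]) or "root" — the identical expression
-- occurs verbatim in both Pythons. field["path"] is ported as getD with default "": Pre_ below
-- excludes the fields without a "path" key, exactly where Python raises KeyError.
-- split('.') has a non-empty separator, so Str.split? returns some; [:-1] is List.slice _ none (some (-1)).
def pvParent (field : List (String × String)) : String :=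
  let path := (PySem.Dict.mk field).getD "path" ""
  let joined := PySem.Str.join "." (PySem.List.slice ((PySem.Str.split? path ".").getD []) none (some (-1)))
  if joined == "" then "root" else joined

-- ===== PORT A =====
-- the loop body of A, as a named step function (same statements, same order)
def pvStepA (groups : PySem.Dict String (List (List (String × String))))
    (field : List (String × String)) : PySem.Dict String (List (List (String × String))) :=
  let parent := pvParent field
  -- if parent not in groups: groups[parent] = []
  let groups1 := if groups.contains parent then groups else groups.insert parent []
  -- groups[parent].append(field)  (key present here; modify's default [] is never read)
  groups1.modify parent [] (fun l => l ++ [field])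

def group_fields (fields : List (List (String × String))) : List (List (List (String × String))) :=
  (fields.foldl pvStepA PySem.Dict.empty).values

-- ===== PORT B =====
def group_fields_alt (fields : List (List (String × String))) : List (List (List (String × String))) :=
  -- pass 1: distinct parents in first-appearance order ('if p not in parents: parents.append(p)');
  -- pass 2: one filtering scan per parent
  (fields.foldl (fun acc field => PySem.Set.add acc (pvParent field)) PySem.Set.empty).map
    (fun p => fields.filter (fun f => pvParent f == p))

-- ===== PRECONDITION & SPEC =====
-- Pre_ excludes exactly the inputs where some field has no "path" key: there A raises KeyError.
def Pre_group_fields (fields : List (List (String × String))) : Prop :=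
  (fields.all (fun field => field.any (fun kv => kv.1 == "path"))) = true
instance (fields : List (List (String × String))) : Decidable (Pre_group_fields fields) := by
  unfold Pre_group_fields; infer_instance

def pvWitness_group_fields : (List (List (String × String))) :=
  [[("path", "a.b"), ("type", "string")], [("path", "a.c")], [("path", "x")]]

def Spec_group_fields (fields : List (List (String × String))) (out : List (List (List (String × String)))) : Prop := out = group_fields_alt fields
instance (fields : List (List (String × String))) (out : List (List (List (String × String)))) : Decidable (Spec_group_fields fields out) := by unfold Spec_group_fields; infer_instance

-- ===== CLAIM (what is proved, stated in full; the proofs are below) =====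
def Claim_equal_group_fields : Prop := ∀ (fields : List (List (String × String))), Dom_group_fields fields → Pre_group_fields fields → Spec_group_fields fields (group_fields fields)

-- ===== LEMMAS AND PROOFS =====

-- A's guarded step (insert [] when absent, then append) is one dict 'modify'.
theorem pv_step_eq_modify (d : PySem.Dict String (List (List (String × String))))
    (p : String) (f : List (String × String)) :
    PySem.Dict.modify (if d.contains p then d else d.insert p []) p [] (fun l => l ++ [f])
      = d.modify p [] (fun l => l ++ [f]) := by
  by_cases h : d.contains p = true
  · simp [h]
  · have hg := PySem.Dict.getD_of_not_contains d (k := p) ([] : List (List (String × String)))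
      (by simpa using h)
    simp [h, PySem.Dict.modify, PySem.Dict.getD_insert_self, PySem.Dict.insert_insert_self, hg]

theorem pvStepA_eq (d : PySem.Dict String (List (List (String × String))))
    (f : List (String × String)) :
    pvStepA d f = d.modify (pvParent f) [] (fun l => l ++ [f]) := by
  simp only [pvStepA]
  exact pv_step_eq_modify d (pvParent f) f

-- A's accumulation loop, with the guarded step replaced by the plain 'modify' step.
theorem pv_dict_eq (fields : List (List (String × String))) :
    fields.foldl pvStepA PySem.Dict.empty
    = fields.foldl (fun d f => d.modify (pvParent f) [] (fun l => l ++ [f]))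
        PySem.Dict.empty :=
  PySem.List.foldl_congr_mem fields pvStepA _ PySem.Dict.empty
    (fun acc x _ => pvStepA_eq acc x)

-- ===== VERDICT (by name: the statement is the Claim_ definition above) =====
set_option maxHeartbeats 4000000 in
theorem group_fields_spec : Claim_equal_group_fields := by
  intro fields _dom _pre
  unfold Spec_group_fields group_fields group_fields_alt
  rw [pv_dict_eq]
  rw [← PySem.Set.update_map_eq_foldl_add, PySem.Set.update_empty]
  have hpair : fields.foldl (fun d f => d.modify (pvParent f) [] (fun l => l ++ [f]))
        PySem.Dict.empty
      = (fields.map (fun f => (pvParent f, f))).foldl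
          (fun d q => d.modify q.1 [] (fun l => l ++ [q.2])) PySem.Dict.empty :=
    (List.foldl_map (f := fun f => (pvParent f, f))
      (g := fun d q => PySem.Dict.modify d q.1 [] (fun l => l ++ [q.2]))).symm
  have hnd : (fields.foldl (fun d f => d.modify (pvParent f) [] (fun l => l ++ [f]))
      PySem.Dict.empty).keys.Nodup :=
    PySem.Dict.nodup_keys_foldl_modify_key fields pvParent []
      (fun _ f => (fun l => l ++ [f])) PySem.Dict.empty (by simp)
  have hk0 := PySem.Dict.keys_foldl_modify_key fields pvParent []
      (fun _ f => (fun l => l ++ [f])) PySem.Dict.empty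
  have hkeys : (fields.foldl (fun d f => d.modify (pvParent f) [] (fun l => l ++ [f]))
      PySem.Dict.empty).keys = PySem.Set.ofList (fields.map pvParent) := by
    simpa [PySem.Dict.keys_empty, PySem.Set.update_nil_left] using hk0
  rw [PySem.Dict.values_eq_map_keys _ hnd [], hkeys]
  refine List.map_congr_left (fun k _ => ?_)
  rw [hpair, PySem.Dict.getD_foldl_modify_append, PySem.Dict.getD_empty, List.nil_append,
    List.filter_map, List.map_map]
  simp [Function.comp_def]
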